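-- pv_equiv track=rewrite | github.com/Michael-Pytel/ENTSO-E-Weather-Data-Platform | Integration Services Project1/PythonScripts/optimized_fact_processor.py | _find_applicable_bidding_zone
-- ===== SOURCE A (Python) =====
-- def _find_applicable_bidding_zone(zone_dict, zone_code, year):
--     """
--     Znajdź odpowiednie bidding_zone_id dla danego kodu strefy i roku.
--     """
--     applicable_records = []
--     for (code, record_year), zone_id in zone_dict.items():
--         if code == zone_code and record_year <= year:
--             applicable_records.append((record_year, zone_id))
--
--     if not applicable_records:
--         return 0
--
--     applicable_records.sort(reverse=True)
--     return applicable_records[0][1]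
-- ===== SOURCE B (Python) =====
-- def _find_applicable_bidding_zone(zone_dict, zone_code, year):
--     """Single pass: running lexicographic best (record_year, zone_id); no list, no sort."""
--     best = None
--     for (code, record_year), zone_id in zone_dict.items():
--         if code == zone_code and record_year <= year:
--             if best is None or best[0] < record_year or (best[0] == record_year and best[1] < zone_id):
--                 best = (record_year, zone_id)
--     return best[1] if best is not None else 0
-- ===== Notes on version B (the rewrite author's own statement) =====
-- stated objective: simpler
-- what changed: Replaced collect-all-matches + reverse sort + take-first by a single pass keeping a running lexicographic best (record_year, zone_id) tuple, returning its zone_id (0 if none matched).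
import Mathlib
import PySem

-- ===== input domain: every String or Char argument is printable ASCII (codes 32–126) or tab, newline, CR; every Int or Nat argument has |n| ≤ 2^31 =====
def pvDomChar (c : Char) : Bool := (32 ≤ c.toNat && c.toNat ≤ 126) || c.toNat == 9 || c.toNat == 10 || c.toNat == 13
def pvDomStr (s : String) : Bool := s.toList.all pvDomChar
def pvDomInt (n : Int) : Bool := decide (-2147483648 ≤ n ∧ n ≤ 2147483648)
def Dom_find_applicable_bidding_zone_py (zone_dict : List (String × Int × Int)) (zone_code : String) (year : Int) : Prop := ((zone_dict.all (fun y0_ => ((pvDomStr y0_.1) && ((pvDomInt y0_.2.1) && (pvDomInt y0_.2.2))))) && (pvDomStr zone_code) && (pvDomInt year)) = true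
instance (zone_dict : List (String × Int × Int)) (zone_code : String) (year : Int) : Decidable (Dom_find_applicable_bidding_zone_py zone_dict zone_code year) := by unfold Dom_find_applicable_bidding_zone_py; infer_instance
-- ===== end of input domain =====

-- B replaces A's collect-then-reverse-sort by a single pass keeping a running lexicographic best; same return value, no speed claim proved.


-- ===== PORT A =====
-- literal port of A: collect matching (record_year, zone_id) pairs, sort reverse (tuple key), take [0][1]
def find_applicable_bidding_zone_py (zone_dict : List (String × Int × Int)) (zone_code : String) (year : Int) : Int :=
  let applicable_records :=
    zone_dict.foldl
      (fun acc e => if (e.1 == zone_code) && decide (e.2.1 ≤ year) then acc ++ [(e.2.1, e.2.2)] else acc) []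
  if applicable_records = [] then 0
  else (PySem.List.pyGetD (PySem.List.sorted2 applicable_records Prod.fst Prod.snd true) 0 (0, 0)).2

-- ===== PORT B =====
-- literal port of B: one pass, running best : Option (record_year, zone_id), lexicographic update
def find_applicable_bidding_zone_py_alt (zone_dict : List (String × Int × Int)) (zone_code : String) (year : Int) : Int :=
  let best :=
    zone_dict.foldl
      (fun b e =>
        if (e.1 == zone_code) && decide (e.2.1 ≤ year) then
          match b with
          | none => some (e.2.1, e.2.2)
          | some p =>
              if decide (p.1 < e.2.1) || (decide (p.1 = e.2.1) && decide (p.2 < e.2.2)) then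
                some (e.2.1, e.2.2)
              else some p
        else b)
      none
  match best with
  | some p => p.2
  | none => 0

-- ===== PRECONDITION & SPEC =====
def Spec_find_applicable_bidding_zone_py (zone_dict : List (String × Int × Int)) (zone_code : String) (year : Int) (out : Int) : Prop := out = find_applicable_bidding_zone_py_alt zone_dict zone_code year
instance (zone_dict : List (String × Int × Int)) (zone_code : String) (year : Int) (out : Int) : Decidable (Spec_find_applicable_bidding_zone_py zone_dict zone_code year out) := by unfold Spec_find_applicable_bidding_zone_py; infer_instance

-- ===== CLAIM (what is proved, stated in full; the proofs are below) =====
def Claim_equal_find_applicable_bidding_zone_py : Prop := ∀ (zone_dict : List (String × Int × Int)) (zone_code : String) (year : Int), Dom_find_applicable_bidding_zone_py zone_dict zone_code year → Spec_find_applicable_bidding_zone_py zone_dict zone_code year (find_applicable_bidding_zone_py zone_dict zone_code year)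

-- ===== LEMMAS AND PROOFS =====

-- the reverse-sort 'before' test sorted2 uses at key (fst, snd): bef x h ↔ h <lex x
def pvBef (x h : Int × Int) : Bool :=
  decide (h.1 < x.1) || (!decide (x.1 < h.1) && decide (h.2 < x.2))

-- B's running-best update, over the list of matching records
def pvUpd (b : Option (Int × Int)) (x : Int × Int) : Option (Int × Int) :=
  match b with
  | none => some x
  | some p =>
      if decide (p.1 < x.1) || (decide (p.1 = x.1) && decide (p.2 < x.2)) then some x else some p

theorem pvUpd_eq (b : Option (Int × Int)) (x : Int × Int) :
    pvUpd b x = match b with | none => some x | some h => if pvBef x h then some x else some h := by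
  cases b with
  | none => rfl
  | some p =>
      simp only [pvUpd, pvBef]
      by_cases h1 : p.1 < x.1 <;> by_cases h2 : p.1 = x.1 <;> by_cases h3 : p.2 < x.2 <;>
        simp [h1, h2, h3] <;> omega


theorem pvHead_insertBy (x : Int × Int) (acc : List (Int × Int)) :
    (PySem.List.insertBy pvBef x acc).head? =
      (match acc.head? with | none => some x | some h => if pvBef x h then some x else some h) := by
  cases acc with
  | nil => rfl
  | cons h t =>
      simp only [PySem.List.insertBy, List.head?]
      by_cases hb : pvBef x h <;> simp [hb]

theorem pvFoldl_insertBy_head (rs : List (Int × Int)) :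
    ∀ acc : List (Int × Int),
      (rs.foldl (fun a x => PySem.List.insertBy pvBef x a) acc).head? =
        rs.foldl pvUpd acc.head? := by
  induction rs with
  | nil => intro acc; rfl
  | cons x t ih =>
      intro acc
      simp only [List.foldl]
      rw [ih]
      congr 1
      rw [pvHead_insertBy, pvUpd_eq]

theorem pvSorted2_head (rs : List (Int × Int)) :
    (PySem.List.sorted2 rs Prod.fst Prod.snd true).head? = rs.foldl pvUpd none := by
  have : PySem.List.sorted2 rs Prod.fst Prod.snd true =
      rs.foldl (fun a x => PySem.List.insertBy pvBef x a) [] := by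
    simp only [PySem.List.sorted2, if_true]
    rfl
  rw [this, pvFoldl_insertBy_head rs []]
  rfl

theorem pvFoldl_upd_ne_none (rs : List (Int × Int)) :
    ∀ p : Int × Int, rs.foldl pvUpd (some p) ≠ none := by
  induction rs with
  | nil => intro p; simp
  | cons x t ih =>
      intro p
      simp only [List.foldl, pvUpd]
      split <;> exact ih _

theorem pvFoldl_upd_none_iff (rs : List (Int × Int)) :
    rs.foldl pvUpd none = none ↔ rs = [] := by
  cases rs with
  | nil => simp
  | cons x t =>
      simp only [List.foldl, pvUpd]
      exact ⟨fun h => absurd h (pvFoldl_upd_ne_none t x), fun h => by simp at h⟩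

-- B's fold over zone_dict equals the pvUpd fold over the filtered-mapped record list
theorem pvAlt_fold (zone_code : String) (year : Int) (zd : List (String × Int × Int)) :
    ∀ b : Option (Int × Int),
      zd.foldl
        (fun b e =>
          if (e.1 == zone_code) && decide (e.2.1 ≤ year) then
            match b with
            | none => some (e.2.1, e.2.2)
            | some p =>
                if decide (p.1 < e.2.1) || (decide (p.1 = e.2.1) && decide (p.2 < e.2.2)) then
                  some (e.2.1, e.2.2)
                else some p
          else b)
        b =
      ((zd.filter (fun e => (e.1 == zone_code) && decide (e.2.1 ≤ year))).map
          (fun e => (e.2.1, e.2.2))).foldl pvUpd b := by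
  induction zd with
  | nil => intro b; rfl
  | cons e t ih =>
      intro b
      by_cases hc : ((e.1 == zone_code) && decide (e.2.1 ≤ year)) = true
      · simp only [List.foldl, List.filter_cons, hc, if_pos, List.map_cons]
        rw [ih]
        rfl
      · simp only [List.foldl, List.filter_cons, hc]
        simp only [Bool.false_eq_true, if_false]
        rw [ih]

-- ===== VERDICT (by name: the statement is the Claim_ definition above) =====
theorem find_applicable_bidding_zone_py_spec : Claim_equal_find_applicable_bidding_zone_py := by
  intro zd zc y _
  unfold Spec_find_applicable_bidding_zone_py
  unfold find_applicable_bidding_zone_py find_applicable_bidding_zone_py_alt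
  rw [PySem.List.foldl_append_if (fun e => (e.1 == zc) && decide (e.2.1 ≤ y))
      (fun e => (e.2.1, e.2.2)) zd []]
  simp only [List.nil_append]
  rw [pvAlt_fold zc y zd none]
  set rs := (zd.filter (fun e => (e.1 == zc) && decide (e.2.1 ≤ y))).map (fun e => (e.2.1, e.2.2)) with hrs
  by_cases h : rs = []
  · simp [h]
  · have hne : rs.foldl pvUpd none ≠ none := fun hn => h ((pvFoldl_upd_none_iff rs).mp hn)
    obtain ⟨p, hp⟩ := Option.ne_none_iff_exists'.mp hne
    have hhead : (PySem.List.sorted2 rs Prod.fst Prod.snd true).head? = some p := by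
      rw [pvSorted2_head]; exact hp
    obtain ⟨t, ht⟩ : ∃ t, PySem.List.sorted2 rs Prod.fst Prod.snd true = p :: t := by
      cases hs : PySem.List.sorted2 rs Prod.fst Prod.snd true with
      | nil => rw [hs] at hhead; simp at hhead
      | cons a t => rw [hs] at hhead; simp at hhead; exact ⟨t, by rw [hhead]⟩
    rw [if_neg h, ht, PySem.List.pyGetD_zero_cons, hp]
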